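-- pv_equiv track=rewrite | github.com/odracirh4ck3r/SFW_UNID_DMS_PROTEUS | main_JAGP_V2.py | detectar_metadata
-- ===== SOURCE A (Python) =====
-- def detectar_metadata(texto, metadata):
--     resultado = {
--         "tipo_documento": "Desconocido",
--         "precedencia": "No definida",
--         "proteccion": "No clasificada",
--         "area_destino": "Sin destino"
--     }
--     for campo, opciones in metadata.items():
--         for clave, palabras in opciones.items():
--             if any(palabra in texto for palabra in palabras):
--                 resultado[campo] = clave
--                 break
--     return resultado
-- ===== SOURCE B (Python) =====
-- def _clasifica(found, opciones):
--     # first class whose keyword set intersects the keywords found in the text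
--     for clave, palabras in opciones.items():
--         if not found.isdisjoint(palabras):
--             return clave
--     return None
--
--
-- def detectar_metadata(texto, metadata):
--     # Multi-pattern matcher: collect every keyword once, then scan the TEXT
--     # position by position, trying only the distinct keyword lengths at each
--     # position and testing each fragment against the keyword set (hash lookup).
--     # A keyword is a substring of texto iff it equals some fragment texto[i:i+L].
--     palabras_todas = {p for opciones in metadata.values()
--                         for palabras in opciones.values()
--                         for p in palabras}
--     lens = {len(p) for p in palabras_todas}
--     found = set()
--     for i in range(len(texto) + 1):
--         for L in lens:
--             frag = texto[i:i + L]
--             if frag in palabras_todas: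
--                 found.add(frag)
--     resultado = {
--         "tipo_documento": "Desconocido",
--         "precedencia": "No definida",
--         "proteccion": "No clasificada",
--         "area_destino": "Sin destino"
--     }
--     resultado.update({campo: clave for campo, opciones in metadata.items()
--                       if (clave := _clasifica(found, opciones)) is not None})
--     return resultado
-- ===== Notes on version B (the rewrite author's own statement) =====
-- stated objective: faster
-- what changed: A tests every keyword against the text with its own substring scan (P scans of the whole text); B scans the text once, at each position slicing a fragment for each distinct keyword length and collecting via hash lookups the set of keywords that occur, then classifies each field by set membership with no substring searches.
import Mathlib
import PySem

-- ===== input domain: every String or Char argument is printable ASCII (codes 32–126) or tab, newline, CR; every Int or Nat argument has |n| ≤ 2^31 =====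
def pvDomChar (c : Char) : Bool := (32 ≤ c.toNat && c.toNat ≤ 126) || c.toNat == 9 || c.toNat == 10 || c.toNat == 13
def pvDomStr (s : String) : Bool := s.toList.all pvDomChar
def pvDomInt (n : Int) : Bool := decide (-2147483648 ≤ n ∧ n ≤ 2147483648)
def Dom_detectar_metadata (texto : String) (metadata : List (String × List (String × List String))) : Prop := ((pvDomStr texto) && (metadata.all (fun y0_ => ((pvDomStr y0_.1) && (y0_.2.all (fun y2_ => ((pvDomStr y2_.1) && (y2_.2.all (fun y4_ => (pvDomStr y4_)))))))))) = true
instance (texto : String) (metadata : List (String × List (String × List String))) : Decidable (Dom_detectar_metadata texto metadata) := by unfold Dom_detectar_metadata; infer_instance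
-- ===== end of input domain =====

-- B replaces A's per-keyword substring scans by a single text scan: it builds the set of keyword
-- fragments occurring in texto (trying only the distinct keyword lengths at each position) and then
-- classifies by set membership; measured faster in a timing run.

-- ===== PORT A =====
-- inner 'for clave, palabras in opciones.items(): if any(palabra in texto ...): resultado[campo] = clave; break'
def pvInnerA (texto campo : String) (res : PySem.Dict String String) :
    List (String × List String) → PySem.Dict String String
  | [] => res
  | (clave, palabras) :: rest =>
      if palabras.any (fun palabra => PySem.Str.isIn palabra texto) then res.insert campo clave
      else pvInnerA texto campo res rest

def detectar_metadata (texto : String) (metadata : List (String × List (String × List String))) : List (String × String) :=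
  let resultado : PySem.Dict String String := PySem.Dict.ofList
    [("tipo_documento", "Desconocido"), ("precedencia", "No definida"),
     ("proteccion", "No clasificada"), ("area_destino", "Sin destino")]
  let resultado := (PySem.Dict.ofList metadata).items.foldl
    (fun res p => pvInnerA texto p.1 res (PySem.Dict.ofList p.2).items) resultado
  resultado.items

-- ===== PORT B =====
-- 'frag = texto[i:i+L]; if frag in palabras_todas: found.add(frag)'
def pvTryFrag (pal : PySem.Set String) (texto : String) (s : PySem.Set String) (i L : Int) :
    PySem.Set String :=
  let frag := PySem.Str.slice texto (some i) (some (i + L))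
  if PySem.Set.contains pal frag then PySem.Set.add s frag else s

-- _clasifica: first clave whose palabras intersect found
def pvClasifica (found : PySem.Set String) : List (String × List String) → Option String
  | [] => none
  | (clave, palabras) :: rest =>
      if !(PySem.Set.isdisjoint found palabras) then some clave
      else pvClasifica found rest

def detectar_metadata_alt (texto : String) (metadata : List (String × List (String × List String))) : List (String × String) :=
  let palabras_todas : PySem.Set String :=
    PySem.Set.ofList (((PySem.Dict.ofList metadata).values).flatMap
      (fun opciones => ((PySem.Dict.ofList opciones).values).flatMap (fun palabras => palabras)))
  let lens : PySem.Set Int :=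
    PySem.Set.ofList (palabras_todas.map (fun p => PySem.Str.len p))
  let found : PySem.Set String :=
    (PySem.List.pyRange 0 (PySem.Str.len texto + 1) 1).foldl
      (fun s i => lens.foldl (fun s L => pvTryFrag palabras_todas texto s i L) s)
      PySem.Set.empty
  let resultado : PySem.Dict String String := PySem.Dict.ofList
    [("tipo_documento", "Desconocido"), ("precedencia", "No definida"),
     ("proteccion", "No clasificada"), ("area_destino", "Sin destino")]
  -- '{campo: clave for campo, opciones in metadata.items() if (clave := _clasifica(found, opciones)) is not None}'
  let actualizaciones : PySem.Dict String String := PySem.Dict.ofList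
    ((PySem.Dict.ofList metadata).items.filterMap (fun p =>
      match pvClasifica found (PySem.Dict.ofList p.2).items with
      | some clave => some (p.1, clave)
      | none => none))
  let resultado := PySem.Dict.update resultado actualizaciones.items
  resultado.items

-- ===== PRECONDITION & SPEC =====
def Spec_detectar_metadata (texto : String) (metadata : List (String × List (String × List String))) (out : List (String × String)) : Prop := out = detectar_metadata_alt texto metadata
instance (texto : String) (metadata : List (String × List (String × List String))) (out : List (String × String)) : Decidable (Spec_detectar_metadata texto metadata out) := by unfold Spec_detectar_metadata; infer_instance

-- ===== CLAIM (what is proved, stated in full; the proofs are below) =====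
def Claim_equal_detectar_metadata : Prop := ∀ (texto : String) (metadata : List (String × List (String × List String))), Dom_detectar_metadata texto metadata → Spec_detectar_metadata texto metadata (detectar_metadata texto metadata)

-- ===== LEMMAS AND PROOFS =====

lemma mem_pvTryFrag (pal : PySem.Set String) (texto : String) (s : PySem.Set String) (i L : Int)
    (y : String) :
    y ∈ pvTryFrag pal texto s i L ↔
      y ∈ s ∨ (y = PySem.Str.slice texto (some i) (some (i + L)) ∧
               PySem.Str.slice texto (some i) (some (i + L)) ∈ pal) := by
  unfold pvTryFrag
  by_cases h : PySem.Set.contains pal (PySem.Str.slice texto (some i) (some (i + L))) = true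
  · have hm := (PySem.Set.contains_iff pal _).mp h
    simp [PySem.Set.mem_add, hm]
  · have hm : PySem.Str.slice texto (some i) (some (i + L)) ∉ pal :=
      fun hmem => h ((PySem.Set.contains_iff pal _).mpr hmem)
    simp [hm]

lemma mem_inner_fold (pal : PySem.Set String) (texto : String) (i : Int) (lens : List Int)
    (s : PySem.Set String) (y : String) :
    y ∈ lens.foldl (fun s L => pvTryFrag pal texto s i L) s ↔
      y ∈ s ∨ ∃ L ∈ lens, y = PySem.Str.slice texto (some i) (some (i + L)) ∧
               PySem.Str.slice texto (some i) (some (i + L)) ∈ pal := by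
  induction lens generalizing s with
  | nil => simp
  | cons L rest ih =>
      simp only [List.foldl_cons, ih, mem_pvTryFrag, List.mem_cons]
      constructor
      · rintro ((h | h) | ⟨L', hL', h⟩)
        · exact Or.inl h
        · exact Or.inr ⟨L, Or.inl rfl, h⟩
        · exact Or.inr ⟨L', Or.inr hL', h⟩
      · rintro (h | ⟨L', (rfl | hL'), h⟩)
        · exact Or.inl (Or.inl h)
        · exact Or.inl (Or.inr h)
        · exact Or.inr ⟨L', hL', h⟩

lemma mem_outer_fold (pal : PySem.Set String) (texto : String) (idxs : List Int)
    (lens : List Int) (s : PySem.Set String) (y : String) :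
    y ∈ idxs.foldl (fun s i => lens.foldl (fun s L => pvTryFrag pal texto s i L) s) s ↔
      y ∈ s ∨ ∃ i ∈ idxs, ∃ L ∈ lens,
        y = PySem.Str.slice texto (some i) (some (i + L)) ∧
        PySem.Str.slice texto (some i) (some (i + L)) ∈ pal := by
  induction idxs generalizing s with
  | nil => simp
  | cons i rest ih =>
      simp only [List.foldl_cons, ih, mem_inner_fold, List.mem_cons]
      constructor
      · rintro ((h | ⟨L, hL, h⟩) | ⟨i', hi', h⟩)
        · exact Or.inl h
        · exact Or.inr ⟨i, Or.inl rfl, L, hL, h⟩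
        · exact Or.inr ⟨i', Or.inr hi', h⟩
      · rintro (h | ⟨i', (rfl | hi'), h⟩)
        · exact Or.inl (Or.inl h)
        · exact Or.inl (Or.inr h)
        · exact Or.inr ⟨i', hi', h⟩

-- a fragment texto[i:i+L] with 0 ≤ i, 0 ≤ L is an infix of texto
lemma slice_isInfix (texto : String) (i L : Int) (hi : 0 ≤ i) (hL : 0 ≤ L) :
    (PySem.Str.slice texto (some i) (some (i + L))).toList <:+: texto.toList := by
  rw [PySem.Str.toList_slice, PySem.Chars.slice_eq_listSlice,
      PySem.List.slice_toNat _ hi (by omega)]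
  exact (List.take_prefix _ _).isInfix.trans (List.drop_suffix i.toNat texto.toList).isInfix

-- an infix p of texto equals the fragment texto[i:i+len(p)] for some 0 ≤ i ≤ len(texto)
lemma infix_eq_slice (texto p : String) (h : p.toList <:+: texto.toList) :
    ∃ i : Int, 0 ≤ i ∧ i ≤ (texto.toList.length : Int) ∧
      p = PySem.Str.slice texto (some i) (some (i + PySem.Str.len p)) := by
  obtain ⟨u, v, huv⟩ := h
  refine ⟨(u.length : Int), by positivity, ?_, ?_⟩
  · have : u.length ≤ texto.toList.length := by
      rw [← huv]; simp
    exact_mod_cast this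
  · rw [← String.toList_inj, PySem.Str.toList_slice, PySem.Chars.slice_eq_listSlice,
        PySem.Str.len_eq]
    rw [PySem.List.slice_toNat _ (by positivity) (by positivity)]
    have h1 : ((u.length : Int) + (p.toList.length : Int)).toNat - (u.length : Int).toNat
        = p.toList.length := by omega
    rw [h1]
    have h2 : (u.length : Int).toNat = u.length := by omega
    rw [h2, ← huv]
    simp

-- the found-set characterisation: a keyword of palabras_todas is in found iff it occurs in texto
lemma mem_found_iff (texto : String) (pal : PySem.Set String) (p : String) (hp : p ∈ pal) :
    (p ∈ (PySem.List.pyRange 0 (PySem.Str.len texto + 1) 1).foldl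
      (fun s i => (PySem.Set.ofList (pal.map (fun q => PySem.Str.len q))).foldl
        (fun s L => pvTryFrag pal texto s i L) s)
      PySem.Set.empty) ↔ PySem.Str.isIn p texto = true := by
  rw [mem_outer_fold]
  constructor
  · rintro (h | ⟨i, hi, L, hL, rfl, _⟩)
    · simp [PySem.Set.empty] at h
    · rw [PySem.List.mem_pyRange_one] at hi
      obtain ⟨q, _, rfl⟩ := List.mem_map.mp ((PySem.Set.mem_ofList _ _).mp hL)
      rw [PySem.Str.isIn_iff_infix]
      exact slice_isInfix texto i _ hi.1 (by rw [PySem.Str.len_eq]; positivity)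
  · intro h
    rw [PySem.Str.isIn_iff_infix] at h
    obtain ⟨i, hi0, hin, heq⟩ := infix_eq_slice texto p h
    refine Or.inr ⟨i, ?_, PySem.Str.len p, ?_, heq, heq ▸ hp⟩
    · rw [PySem.List.mem_pyRange_one]
      constructor
      · exact hi0
      · rw [PySem.Str.len_eq]; omega
    · exact (PySem.Set.mem_ofList _ _).mpr (List.mem_map.mpr ⟨p, hp, rfl⟩)

-- A's inner loop, restated as insert-or-keep driven by the first matching clave
def pvClasificaA (texto : String) : List (String × List String) → Option String
  | [] => none
  | (clave, palabras) :: rest =>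
      if palabras.any (fun palabra => PySem.Str.isIn palabra texto) then some clave
      else pvClasificaA texto rest

lemma innerA_eq (texto campo : String) (res : PySem.Dict String String)
    (opcs : List (String × List String)) :
    pvInnerA texto campo res opcs =
      match pvClasificaA texto opcs with
      | some clave => res.insert campo clave
      | none => res := by
  induction opcs with
  | nil => rfl
  | cons hd tl ih =>
      obtain ⟨clave, palabras⟩ := hd
      by_cases h : (palabras.any (fun palabra => PySem.Str.isIn palabra texto)) = true
      · simp only [pvInnerA, pvClasificaA, if_pos h]
      · simp only [pvInnerA, pvClasificaA, if_neg h, ih]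

-- the two classifiers agree when every palabra of opcs is a keyword of pal
lemma clasifica_eq (texto : String) (found pal : PySem.Set String)
    (hfound : ∀ q ∈ pal, (q ∈ found ↔ PySem.Str.isIn q texto = true))
    (opcs : List (String × List String))
    (hsub : ∀ pr ∈ opcs, ∀ q ∈ pr.2, q ∈ pal) :
    pvClasificaA texto opcs = pvClasifica found opcs := by
  induction opcs with
  | nil => rfl
  | cons hd tl ih =>
      obtain ⟨clave, palabras⟩ := hd
      have hcond : palabras.any (fun palabra => PySem.Str.isIn palabra texto)
          = !(PySem.Set.isdisjoint found palabras) := by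
        by_cases h : PySem.Set.isdisjoint found palabras = true
        · have hdisj := (PySem.Set.isdisjoint_iff found palabras).mp h
          rw [h]
          simp only [Bool.not_true]
          rw [List.any_eq_false]
          intro q hq
          have hqpal : q ∈ pal := hsub _ (List.mem_cons_self) q hq
          simp only [Bool.not_eq_true]
          rw [← Bool.not_eq_true]
          intro hin
          exact hdisj q (((hfound q hqpal).mpr hin)) hq
        · have h' : PySem.Set.isdisjoint found palabras = false :=
            Bool.eq_false_iff.mpr h
          rw [h']
          simp only [Bool.not_false]
          rw [List.any_eq_true]
          have : ¬ ∀ x ∈ found, x ∉ palabras := fun hall =>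
            h ((PySem.Set.isdisjoint_iff found palabras).mpr hall)
          push Not at this
          obtain ⟨x, hxf, hxp⟩ := this
          have hxpal : x ∈ pal := hsub _ (List.mem_cons_self) x hxp
          exact ⟨x, hxp, (hfound x hxpal).mp hxf⟩
      simp only [pvClasificaA, pvClasifica, hcond]
      split_ifs
      · rfl
      · exact ih (fun pr hpr => hsub pr (List.mem_cons_of_mem _ hpr))

-- a fold of insert-or-keep is a fold of inserts over the kept pairs
lemma foldl_match_eq_filterMap_foldl {α : Type} (l : List α)
    (g : α → Option (String × String)) (d : PySem.Dict String String) :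
    l.foldl (fun res p =>
        match g p with
        | some kv => res.insert kv.1 kv.2
        | none => res) d
      = (l.filterMap g).foldl (fun acc p => acc.insert p.1 p.2) d := by
  induction l generalizing d with
  | nil => rfl
  | cons hd tl ih =>
      match h : g hd with
      | some kv => simp only [List.foldl_cons, List.filterMap_cons, h, ih]
      | none => simp only [List.foldl_cons, List.filterMap_cons, h, ih]

-- keys of the kept pairs form a sublist of the keys of l
lemma filterMap_fst_sublist {β : Type} (l : List (String × β))
    (g : String × β → Option String) :
    ((l.filterMap (fun p => (g p).map (fun k => (p.1, k)))).map Prod.fst).Sublist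
      (l.map Prod.fst) := by
  induction l with
  | nil => simp
  | cons hd tl ih =>
      match h : g hd with
      | none => simpa [List.filterMap_cons, h] using ih.cons hd.1
      | some k => simpa [List.filterMap_cons, h] using ih.cons₂ hd.1

lemma pvOfList_items_of_nodup (l : List (String × String)) (h : (l.map Prod.fst).Nodup) :
    (PySem.Dict.ofList l).items = l := by
  have := PySem.Dict.items_foldl_insert_fresh (d := (PySem.Dict.empty : PySem.Dict String String))
    (l := l) (k := Prod.fst) (v := Prod.snd)
    (by intro a _; simp [PySem.Dict.contains_empty]) h
  simpa [PySem.Dict.ofList] using this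

-- ===== VERDICT (by name: the statement is the Claim_ definition above) =====
theorem detectar_metadata_spec : Claim_equal_detectar_metadata := by
  intro texto metadata _
  unfold Spec_detectar_metadata
  simp only [detectar_metadata, detectar_metadata_alt]
  set pal : PySem.Set String :=
    PySem.Set.ofList (((PySem.Dict.ofList metadata).values).flatMap
      (fun opciones => ((PySem.Dict.ofList opciones).values).flatMap (fun palabras => palabras)))
    with hpal
  set found : PySem.Set String :=
    (PySem.List.pyRange 0 (PySem.Str.len texto + 1) 1).foldl
      (fun s i => (PySem.Set.ofList (pal.map (fun q => PySem.Str.len q))).foldl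
        (fun s L => pvTryFrag pal texto s i L) s)
      PySem.Set.empty with hfound
  have hchar : ∀ q ∈ pal, (q ∈ found ↔ PySem.Str.isIn q texto = true) := by
    intro q hq
    rw [hfound]
    exact mem_found_iff texto pal q hq
  have hsub : ∀ p ∈ (PySem.Dict.ofList metadata).items,
      ∀ pr ∈ (PySem.Dict.ofList p.2).items, ∀ q ∈ pr.2, q ∈ pal := by
    intro p hp pr hpr q hq
    rw [hpal, PySem.Set.mem_ofList]
    apply List.mem_flatMap.mpr
    refine ⟨p.2, ?_, ?_⟩
    · simp only [PySem.Dict.values]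
      exact List.mem_map.mpr ⟨p, hp, rfl⟩
    · exact List.mem_flatMap.mpr ⟨pr.2, by
        simp only [PySem.Dict.values]
        exact List.mem_map.mpr ⟨pr, hpr, rfl⟩, hq⟩
  -- the kept pairs of B
  set g : String × List (String × List String) → Option (String × String) :=
    (fun p =>
      match pvClasifica found (PySem.Dict.ofList p.2).items with
      | some clave => some (p.1, clave)
      | none => none) with hg
  have hg' : g = fun p =>
      (pvClasifica found (PySem.Dict.ofList p.2).items).map (fun k => (p.1, k)) := by
    funext p
    rw [hg]
    match h : pvClasifica found (PySem.Dict.ofList p.2).items with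
    | some clave => simp [h]
    | none => simp [h]
  have hnodup : (((PySem.Dict.ofList metadata).items.filterMap g).map Prod.fst).Nodup := by
    rw [hg']
    exact (filterMap_fst_sublist _ _).nodup (PySem.Dict.nodup_keys_ofList metadata)
  have hitems : (PySem.Dict.ofList ((PySem.Dict.ofList metadata).items.filterMap g)).items
      = (PySem.Dict.ofList metadata).items.filterMap g :=
    pvOfList_items_of_nodup _ hnodup
  rw [hitems, PySem.Dict.update, ← foldl_match_eq_filterMap_foldl]
  congr 1
  apply PySem.List.foldl_congr_mem
  intro res p hp
  rw [innerA_eq, hg,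
      clasifica_eq texto found pal hchar _ (fun pr hpr q hq => hsub p hp pr hpr q hq)]
  beta_reduce
  cases pvClasifica found (PySem.Dict.ofList p.2).items <;> rfl
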